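-- pv_equiv track=rewrite | github.com/habie2/python-exercises-weekly273 | w10-jsd/exercise3.py | list2_searchs
-- ===== SOURCE A (Python) =====
-- def list_search(lista: list, searched_element: int):
--     n = 0
--     pos_lista = []
--     while searched_element in lista[n:]:
--         # By using the second parameter of index, we declare the position we
--         # would like to start to search that element in the list. We could also
--         # declare and end parameter, but in this case is not practical.
--         index_num = lista.index(searched_element, n)
--         pos_lista.append(index_num)
--         n = index_num + 1
--     return tuple(pos_lista)
--
-- def list2_searchs(lista1: list, lista2: list, searched_element: int):
--     # List to store the positions of the repeated elements (starting by zero)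
--     pos_repeated = []
--
--     result1 = list_search(lista1, searched_element)
--     result2 = list_search(lista2, searched_element)
--     if len(result1) <= len(result2):
--         for i in range(len(result1)):
--             if result1[i] in result2:
--                 pos_repeated.append(result1[i])
--     else:
--         for i in range(len(result2)):
--             if result2[i] in result1:
--                 pos_repeated.append(result2[i])
--     return pos_repeated, searched_element
-- ===== SOURCE B (Python) =====
-- def list2_searchs(lista1: list, lista2: list, searched_element: int):
--     m = min(len(lista1), len(lista2))
--     pos_repeated = [i for i in range(m)
--                     if lista1[i] == searched_element and lista2[i] == searched_element]
--     return pos_repeated, searched_element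
-- ===== Notes on version B (the rewrite author's own statement) =====
-- stated objective: simpler
-- what changed: Replaces A's two per-list index-tuple collections (repeated list.index scans) plus a length-compared membership-intersection pass with a single aligned scan over range(min(len(lista1), len(lista2))) that appends i when both lists hold the element at i.
import Mathlib
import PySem

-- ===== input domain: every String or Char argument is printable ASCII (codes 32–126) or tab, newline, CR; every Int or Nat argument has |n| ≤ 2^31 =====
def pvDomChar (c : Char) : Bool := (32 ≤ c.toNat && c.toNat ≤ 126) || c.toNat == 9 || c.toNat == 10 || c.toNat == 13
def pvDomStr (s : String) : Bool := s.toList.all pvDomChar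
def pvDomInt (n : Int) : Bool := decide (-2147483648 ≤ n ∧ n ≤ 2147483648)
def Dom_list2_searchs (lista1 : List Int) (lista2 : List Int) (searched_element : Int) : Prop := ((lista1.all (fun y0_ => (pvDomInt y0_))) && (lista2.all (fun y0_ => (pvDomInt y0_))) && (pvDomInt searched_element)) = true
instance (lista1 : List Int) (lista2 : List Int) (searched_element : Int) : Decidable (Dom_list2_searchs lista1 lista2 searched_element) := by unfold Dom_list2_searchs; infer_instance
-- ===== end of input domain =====

-- B replaces A's two per-list index collections plus a membership-intersection pass with one
-- aligned scan over range(min(len(lista1), len(lista2))) (objective: simpler).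

-- ===== PORT A =====
-- the while loop of list_search: n only ever holds 0 or index+1 ≥ 0, so it is carried as a Nat;
-- 'lista.index(searched_element, n)' is n + index? of the dropped tail (the guard guarantees the
-- element is found, so the .getD 0 default is never used — Python's ValueError is unreachable here)
def listSearchGo (lista : List Int) (x : Int) (n : Nat) (acc : List Int) : List Int :=
  if h : x ∈ lista.drop n then
    let idx := n + ((PySem.List.index? (lista.drop n) x).getD 0)
    listSearchGo lista x (idx + 1) (acc ++ [(idx : Int)])
  else acc
termination_by lista.length - n
decreasing_by
  obtain ⟨k, hk⟩ := Option.isSome_iff_exists.mp ((PySem.List.index?_isSome_iff _ _).mpr h)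
  obtain ⟨hlt, -⟩ := PySem.List.getElem_of_index?_eq_some hk
  have hd : (lista.drop n).length = lista.length - n := List.length_drop ..
  have hne : lista.drop n ≠ [] := by intro hnil; rw [hnil] at h; exact (List.not_mem_nil) h
  have hn : n < lista.length := by
    by_contra hge
    exact hne (List.drop_eq_nil_of_le (by omega))
  simp only [hk, Option.getD_some]
  omega

def listSearch (lista : List Int) (searched_element : Int) : List Int :=
  listSearchGo lista searched_element 0 []

def list2_searchs (lista1 : List Int) (lista2 : List Int) (searched_element : Int) : List Int × Int :=
  let result1 := listSearch lista1 searched_element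
  let result2 := listSearch lista2 searched_element
  if result1.length ≤ result2.length then
    ((PySem.List.pyRange 0 (result1.length : Int) 1).foldl
      (fun acc i =>
        if PySem.List.pyGetD result1 i 0 ∈ result2 then
          acc ++ [PySem.List.pyGetD result1 i 0]
        else acc) [],
     searched_element)
  else
    ((PySem.List.pyRange 0 (result2.length : Int) 1).foldl
      (fun acc i =>
        if PySem.List.pyGetD result2 i 0 ∈ result1 then
          acc ++ [PySem.List.pyGetD result2 i 0]
        else acc) [],
     searched_element)

-- ===== PORT B =====
def list2_searchs_alt (lista1 : List Int) (lista2 : List Int) (searched_element : Int) : List Int × Int :=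
  let m : Int := min (lista1.length : Int) (lista2.length : Int)
  ((PySem.List.pyRange 0 m 1).filter
     (fun i => PySem.List.pyGetD lista1 i 0 == searched_element
               && PySem.List.pyGetD lista2 i 0 == searched_element),
   searched_element)

-- ===== PRECONDITION & SPEC =====
def Spec_list2_searchs (lista1 : List Int) (lista2 : List Int) (searched_element : Int) (out : List Int × Int) : Prop := out = list2_searchs_alt lista1 lista2 searched_element
instance (lista1 : List Int) (lista2 : List Int) (searched_element : Int) (out : List Int × Int) : Decidable (Spec_list2_searchs lista1 lista2 searched_element out) := by unfold Spec_list2_searchs; infer_instance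

-- ===== CLAIM (what is proved, stated in full; the proofs are below) =====
def Claim_equal_list2_searchs : Prop := ∀ (lista1 : List Int) (lista2 : List Int) (searched_element : Int), Dom_list2_searchs lista1 lista2 searched_element → Spec_list2_searchs lista1 lista2 searched_element (list2_searchs lista1 lista2 searched_element)

-- ===== LEMMAS AND PROOFS =====

-- characterisation of A's helper: the ascending list of indices ≥ n at which x occurs
theorem listSearchGo_eq (lista : List Int) (x : Int) (n : Nat) (acc : List Int) :
    listSearchGo lista x n acc
      = acc ++ (PySem.List.pyRange (n : Int) (lista.length : Int) 1).filter
          (fun i => PySem.List.pyGet? lista i == some x) := by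
  fun_induction listSearchGo lista x n acc with
  | case1 n acc h idx ih =>
    obtain ⟨k, hk⟩ := Option.isSome_iff_exists.mp ((PySem.List.index?_isSome_iff _ _).mpr h)
    obtain ⟨hlt, hget, hmin⟩ := PySem.List.getElem_of_index?_eq_some hk
    have hd : (lista.drop n).length = lista.length - n := List.length_drop ..
    have hn : n < lista.length := by
      by_contra hge
      have : lista.drop n = [] := List.drop_eq_nil_of_le (by omega)
      rw [this] at h; exact (List.not_mem_nil) h
    have hidx : idx = n + k := by simp only [idx, hk, Option.getD_some]
    have hkl : n + k < lista.length := by omega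
    -- value at idx
    have hval : lista[n + k]'hkl = x := by
      rw [← hget]; exact (List.getElem_drop ..).symm
    -- split the range at n+k
    have hsplit := PySem.List.pyRange_one_append (n : Int) ((n+k : Nat) : Int) (lista.length : Int)
      (by exact_mod_cast Nat.le_add_right n k) (by exact_mod_cast hkl.le)
    rw [ih, hsplit, List.filter_append]
    have hnil : (PySem.List.pyRange (n : Int) ((n+k : Nat) : Int) 1).filter
        (fun i => PySem.List.pyGet? lista i == some x) = [] := by
      rw [List.filter_eq_nil_iff]
      intro i hi
      rw [PySem.List.mem_pyRange_one] at hi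
      obtain ⟨m, rfl⟩ : ∃ m : ℕ, i = (m : Int) := ⟨i.toNat, by omega⟩
      have hitn : m < lista.length := by omega
      have hin : n ≤ m := by omega
      have hik : m - n < k := by omega
      have hne := hmin (m - n) hik
      rw [List.getElem_drop] at hne
      simp only [PySem.List.pyGet?_natCast, List.getElem?_eq_getElem hitn,
        beq_iff_eq, Option.some.injEq]
      intro hEq
      exact hne (by rw [← hEq]; congr 1; omega)
    have hcons : PySem.List.pyRange ((n+k : Nat) : Int) (lista.length : Int) 1
        = ((n+k : Nat) : Int) :: PySem.List.pyRange (((n+k : Nat) : Int) + 1) (lista.length : Int) 1 :=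
      PySem.List.pyRange_one_cons (by exact_mod_cast hkl)
    rw [hcons]
    have hp : PySem.List.pyGet? lista ((n+k : Nat) : Int) = some x := by
      rw [PySem.List.pyGet?_natCast, List.getElem?_eq_getElem hkl, hval]
    simp only [List.filter_cons, hp, hnil, hidx]
    simp [List.append_assoc]
  | case2 n acc h =>
    have hnil : (PySem.List.pyRange (n : Int) (lista.length : Int) 1).filter
        (fun i => PySem.List.pyGet? lista i == some x) = [] := by
      rw [List.filter_eq_nil_iff]
      intro i hi
      rw [PySem.List.mem_pyRange_one] at hi
      obtain ⟨m, rfl⟩ : ∃ m : ℕ, i = (m : Int) := ⟨i.toNat, by omega⟩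
      have hitn : m < lista.length := by omega
      simp only [PySem.List.pyGet?_natCast, List.getElem?_eq_getElem hitn,
        beq_iff_eq, Option.some.injEq]
      intro hEq
      apply h
      rw [← hEq]
      have hlen : m - n < (lista.drop n).length := by rw [List.length_drop]; omega
      have hmem := List.getElem_mem hlen
      rw [List.getElem_drop] at hmem
      simpa [show n + (m - n) = m from by omega] using hmem
    simp [hnil]

theorem listSearch_eq (lista : List Int) (x : Int) :
    listSearch lista x
      = (PySem.List.pyRange 0 (lista.length : Int) 1).filter
          (fun i => PySem.List.pyGet? lista i == some x) := by
  have h := listSearchGo_eq lista x 0 []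
  simpa [listSearch] using h

-- intersecting the two ascending index lists = one aligned scan up to the shorter length

theorem inter_eq (la lb : List Int) (x : Int) :
    ((PySem.List.pyRange 0 (la.length : Int) 1).filter
        (fun i => PySem.List.pyGet? la i == some x)).filter
      (fun i => decide (i ∈ (PySem.List.pyRange 0 (lb.length : Int) 1).filter
        (fun j => PySem.List.pyGet? lb j == some x)))
    = (PySem.List.pyRange 0 (min (la.length : Int) (lb.length : Int)) 1).filter
        (fun i => PySem.List.pyGetD la i 0 == x && PySem.List.pyGetD lb i 0 == x) := by
  rw [List.filter_filter]
  have hm0 : (0:Int) ≤ min (la.length : Int) (lb.length : Int) := by positivity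
  have hma : min (la.length : Int) (lb.length : Int) ≤ (la.length : Int) := min_le_left _ _
  rw [PySem.List.pyRange_one_append 0 (min (la.length : Int) (lb.length : Int)) (la.length : Int) hm0 hma,
    List.filter_append]
  have hnil : (PySem.List.pyRange (min (la.length : Int) (lb.length : Int)) (la.length : Int) 1).filter
      (fun i => decide (i ∈ (PySem.List.pyRange 0 (lb.length : Int) 1).filter
        (fun j => PySem.List.pyGet? lb j == some x)) && (PySem.List.pyGet? la i == some x)) = [] := by
    rw [List.filter_eq_nil_iff]
    intro i hi
    rw [PySem.List.mem_pyRange_one] at hi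
    rcases le_total (lb.length : Int) (la.length : Int) with hba | hab
    · have : ¬ (i ∈ (PySem.List.pyRange 0 (lb.length : Int) 1).filter
          (fun j => PySem.List.pyGet? lb j == some x)) := by
        intro hmem
        rw [List.mem_filter, PySem.List.mem_pyRange_one] at hmem
        omega
      simp [this]
    · have : min (la.length : Int) (lb.length : Int) = (la.length : Int) := min_eq_left hab
      omega
  rw [hnil, List.append_nil]
  apply List.filter_congr
  intro i hi
  rw [PySem.List.mem_pyRange_one] at hi
  obtain ⟨m, rfl⟩ : ∃ m : ℕ, i = (m : Int) := ⟨i.toNat, by omega⟩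
  have hia : m < la.length := by omega
  have hib : m < lb.length := by omega
  have hmem : ((m : Int) ∈ (PySem.List.pyRange 0 (lb.length : Int) 1).filter
      (fun j => PySem.List.pyGet? lb j == some x))
      ↔ (lb[m] = x) := by
    rw [List.mem_filter, PySem.List.mem_pyRange_one]
    simp [hib]
  simp only [PySem.List.pyGet?_natCast, PySem.List.pyGetD_natCast,
    List.getElem?_eq_getElem hia, List.getD_eq_getElem _ _ hia, List.getD_eq_getElem _ _ hib, hmem]
  by_cases hbx : lb[m] = x <;> by_cases hax : la[m] = x <;> simp [hbx, hax]

-- ===== VERDICT (by name: the statement is the Claim_ definition above) =====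
theorem list2_searchs_spec : Claim_equal_list2_searchs := by
  intro l1 l2 x _
  show list2_searchs l1 l2 x = list2_searchs_alt l1 l2 x
  unfold list2_searchs list2_searchs_alt
  simp only [listSearch_eq]
  set r1 := (PySem.List.pyRange 0 (l1.length : Int) 1).filter
      (fun i => PySem.List.pyGet? l1 i == some x) with hr1
  set r2 := (PySem.List.pyRange 0 (l2.length : Int) 1).filter
      (fun i => PySem.List.pyGet? l2 i == some x) with hr2
  split_ifs with hle
  · rw [PySem.List.foldl_pyRange_zero_pyGetD' r1 0
        (fun acc v => if v ∈ r2 then acc ++ [v] else acc) [],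
      PySem.List.foldl_append_ite_eq_filter, List.nil_append, hr1, hr2, inter_eq]
  · rw [PySem.List.foldl_pyRange_zero_pyGetD' r2 0
        (fun acc v => if v ∈ r1 then acc ++ [v] else acc) [],
      PySem.List.foldl_append_ite_eq_filter, List.nil_append, hr1, hr2, inter_eq, min_comm]
    congr 1
    apply List.filter_congr
    intro i _
    exact Bool.and_comm ..
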